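-- pv_equiv track=rewrite | github.com/BaekKyunShin/Algospot | bm.py | binary_count
-- ===== SOURCE A (Python) =====
-- def get_one_index(inputList):
--     ''' inputList에서 왼쪽부터 시작해 처음 1이 나오는 element의 index return'''
--     firstOneIndex = 0
--     for index in range(len(inputList)):
--         if inputList[index] == 1:
--             firstOneIndex = index
--             break
--     return firstOneIndex
--
-- def binary_count(inputList):
--     firstOneIndex = get_one_index(inputList)
--     if firstOneIndex == 0 and inputList[0] == 0: return 0 # input이 0인 경우
--     count = 0
--     while len(inputList) > 0:
--         lastNum = inputList[-1]
--         if lastNum == 0: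
--             inputList.pop(-1)
--         else:
--             inputList[-1] = 0
--         count += 1
--         if firstOneIndex == len(inputList)-1 and inputList[-1] == 0: # firstOneIndex에 해당하는 element가 0일때 while문 break
--             break
--     return count
-- ===== SOURCE B (Python) =====
-- def binary_count(inputList):
--     # Closed form: first index j with element == 1 (0 if none); unlike A, does
--     # not mutate inputList (equivalence is about the return value only).
--     j = next((i for i, x in enumerate(inputList) if x == 1), 0)
--     if j == 0 and inputList[0] == 0:
--         return 0
--     tail = inputList[j + 1:]
--     return 1 + len(tail) + sum(1 for x in tail if x != 0)
-- ===== Notes on version B (the rewrite author's own statement) =====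
-- stated objective: simpler
-- what changed: Replaces A's destructive pop/flip while-loop with a closed form over the original list (1 + tail length + nonzeros after the first 1); B does not mutate inputList, so the proved equivalence is about the return value only.
import Mathlib
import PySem

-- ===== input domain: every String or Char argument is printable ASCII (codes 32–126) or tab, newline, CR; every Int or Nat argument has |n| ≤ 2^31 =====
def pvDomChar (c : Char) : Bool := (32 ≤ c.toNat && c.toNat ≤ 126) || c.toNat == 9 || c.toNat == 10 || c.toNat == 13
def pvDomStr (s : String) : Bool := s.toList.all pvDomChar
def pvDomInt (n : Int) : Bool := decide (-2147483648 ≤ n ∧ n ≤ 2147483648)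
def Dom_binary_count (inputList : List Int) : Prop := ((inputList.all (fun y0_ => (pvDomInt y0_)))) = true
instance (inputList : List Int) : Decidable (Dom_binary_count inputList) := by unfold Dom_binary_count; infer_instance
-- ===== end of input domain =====

-- B replaces A's destructive pop/flip while-loop by a closed form over the original
-- list (simpler); A mutates inputList in place, B does not — the equivalence proved
-- here is about the RETURN value only.

-- ===== PORT A =====
-- the for-loop of get_one_index: walks the list carrying the current index, breaks at
-- the first element == 1, returns the default 0 if the loop finishes without break
def getOneIndexGo : List Int → Nat → Nat
  | [], _ => 0
  | x :: xs, i => if x = 1 then i else getOneIndexGo xs (i + 1)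

-- the while-loop of binary_count: state = (list, count); inputList[-1] is getLastD,
-- pop(-1) is dropLast, 'inputList[-1] = 0' is dropLast ++ [0]; the break test reads
-- inputList[-1] only when firstOneIndex == len-1 (short-circuit), so the list is then
-- nonempty and getLastD is exact
def binLoop (j : Nat) (l : List Int) (count : Int) : Int :=
  if 0 < l.length then
    if l.getLastD 0 = 0 then
      if (j : Int) = (l.dropLast.length : Int) - 1 ∧ l.dropLast.getLastD 1 = 0 then count + 1
      else binLoop j l.dropLast (count + 1)
    else
      if (j : Int) = ((l.dropLast ++ [0]).length : Int) - 1 ∧ (l.dropLast ++ [0]).getLastD 1 = 0 then count + 1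
      else binLoop j (l.dropLast ++ [0]) (count + 1)
  else count
termination_by 2 * l.length + (if l.getLastD 0 = 0 then 0 else 1)
decreasing_by
  · have := List.length_dropLast (xs := l); split_ifs <;> simp_all <;> omega
  · simp only [List.length_append, List.length_dropLast, List.getLastD_concat]
    split_ifs <;> simp_all <;> omega

-- inputList[0] of the guard: the empty list raises IndexError there and is excluded by Pre_
def binary_count (inputList : List Int) : Int :=
  let firstOneIndex := getOneIndexGo inputList 0
  if firstOneIndex = 0 ∧ inputList.headD 1 = 0 then 0
  else binLoop firstOneIndex inputList 0

-- ===== PORT B =====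
def binary_count_alt (inputList : List Int) : Int :=
  let j := (List.findIdx? (· = 1) inputList).getD 0
  if j = 0 ∧ inputList.headD 1 = 0 then 0
  else
    let tail := inputList.drop (j + 1)
    1 + (tail.length : Int) + (tail.countP (· ≠ 0) : Int)

-- ===== PRECONDITION & SPEC =====
-- A raises IndexError on the empty list (inputList[0] in the guard); B raises there too.
def Pre_binary_count (inputList : List Int) : Prop := inputList ≠ []
instance (inputList : List Int) : Decidable (Pre_binary_count inputList) := by unfold Pre_binary_count; infer_instance
def pvWitness_binary_count : List Int := [0, 1, 0, 2]

def Spec_binary_count (inputList : List Int) (out : Int) : Prop := out = binary_count_alt inputList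
instance (inputList : List Int) (out : Int) : Decidable (Spec_binary_count inputList out) := by unfold Spec_binary_count; infer_instance

-- ===== CLAIM (what is proved, stated in full; the proofs are below) =====
def Claim_equal_binary_count : Prop := ∀ (inputList : List Int), Dom_binary_count inputList → Pre_binary_count inputList → Spec_binary_count inputList (binary_count inputList)

-- ===== LEMMAS AND PROOFS =====

-- A's index search agrees with B's findIdx? (shifted by the start index)
theorem getOneIndexGo_eq (l : List Int) (i : Nat) :
    getOneIndexGo l i = ((List.findIdx? (· = 1) l).map (· + i)).getD 0 := by
  induction l generalizing i with
  | nil => simp [getOneIndexGo]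
  | cons x xs ih =>
      simp only [getOneIndexGo, List.findIdx?_cons]
      by_cases hx : x = 1
      · simp [hx]
      · simp only [hx, decide_false, if_neg, ih (i + 1)]
        cases h : List.findIdx? (fun x => decide (x = 1)) xs <;> simp <;> omega

theorem getLastD_getD (l : List Int) (d : Int) (h : 0 < l.length) :
    l.getLastD d = l.getD (l.length - 1) d := by
  rw [List.getLastD_eq_getLast?, List.getLast?_eq_getElem?, List.getD_eq_getElem?_getD]

theorem getD_indep (l : List Int) (i : Nat) (d d' : Int) (h : i < l.length) :
    l.getD i d = l.getD i d' := by
  rw [List.getD_eq_getElem _ _ h, List.getD_eq_getElem _ _ h]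

theorem getD_dropLast (l : List Int) (i : Nat) (d : Int) (h : i < l.length - 1) :
    l.dropLast.getD i d = l.getD i d := by
  have h1 : i < l.dropLast.length := by rw [List.length_dropLast]; omega
  have h2 : i < l.length := by omega
  rw [List.getD_eq_getElem _ _ h1, List.getD_eq_getElem _ _ h2, List.getElem_dropLast]

theorem getD_drop (l : List Int) (i k : Nat) (d : Int) (h : i + k < l.length) :
    (l.drop i).getD k d = l.getD (i + k) d := by
  have h1 : k < (l.drop i).length := by rw [List.length_drop]; omega
  rw [List.getD_eq_getElem _ _ h1, List.getD_eq_getElem _ _ h, List.getElem_drop]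

theorem getD_append_left (l₁ l₂ : List Int) (i : Nat) (d : Int) (h : i < l₁.length) :
    (l₁ ++ l₂).getD i d = l₁.getD i d := by
  have h1 : i < (l₁ ++ l₂).length := by rw [List.length_append]; omega
  rw [List.getD_eq_getElem _ _ h1, List.getD_eq_getElem _ _ h,
    List.getElem_append_left h]

theorem drop_dropLast' (l : List Int) (k : Nat) : l.dropLast.drop k = (l.drop k).dropLast := by
  rw [List.dropLast_eq_take, List.drop_take, List.dropLast_eq_take (l := l.drop k), List.length_drop]
  congr 1
  omega

theorem countP_dropLast (t : List Int) (h : 0 < t.length) :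
    (t.countP (· ≠ 0) : Int) =
      (t.dropLast.countP (· ≠ 0) : Int) + (if t.getD (t.length - 1) 0 ≠ 0 then 1 else 0) := by
  have hne : t ≠ [] := by intro he; simp [he] at h
  have hlast : t.getLast hne = t.getD (t.length - 1) 0 := by
    have hsome : t.getLast? = some (t.getLast hne) := List.getLast?_eq_getLast hne
    rw [← getLastD_getD _ _ h, List.getLastD_eq_getLast?, hsome]
    rfl
  conv_lhs => rw [← List.dropLast_append_getLast hne]
  rw [List.countP_append, List.countP_singleton, hlast]
  split_ifs <;> simp_all <;> omega

-- A's while loop computes the closed form, provided element j is present and nonzero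
theorem binLoop_eq (j : Nat) (l : List Int) (c : Int) :
    j < l.length → l.getD j 0 ≠ 0 →
    binLoop j l c = c + 1 + ((l.drop (j + 1)).length : Int) + ((l.drop (j + 1)).countP (· ≠ 0) : Int) := by
  induction l, c using binLoop.induct j with
  | case1 l c hlen hlast hbrk =>
      intro hj hnz
      exfalso
      obtain ⟨hb1, hb2⟩ := hbrk
      rw [List.length_dropLast] at hb1
      have hn2 : 2 ≤ l.length := by omega
      have hj' : j = l.length - 1 - 1 := by omega
      have hdl : 0 < l.dropLast.length := by rw [List.length_dropLast]; omega
      rw [getLastD_getD _ _ hdl, List.length_dropLast,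
        getD_dropLast _ _ _ (by omega), ← hj', getD_indep _ _ _ 0 (by omega)] at hb2
      exact hnz hb2
  | case2 l c hlen hlast hbrk ih =>
      intro hj hnz
      rw [getLastD_getD _ _ hlen] at hlast
      have hjlt : j < l.length - 1 := by
        rcases Nat.lt_or_ge j (l.length - 1) with h | h
        · exact h
        · exfalso
          have hje : j = l.length - 1 := by omega
          rw [hje] at hnz
          exact hnz hlast
      have hj1 : j < l.dropLast.length := by rw [List.length_dropLast]; omega
      have hnz1 : l.dropLast.getD j 0 ≠ 0 := by rw [getD_dropLast _ _ _ hjlt]; exact hnz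
      rw [binLoop, if_pos hlen, if_pos (by rw [getLastD_getD _ _ hlen]; exact hlast),
        if_neg hbrk, ih hj1 hnz1, drop_dropLast']
      have ht : 0 < (l.drop (j + 1)).length := by rw [List.length_drop]; omega
      have hlastt : (l.drop (j + 1)).getD ((l.drop (j + 1)).length - 1) 0 = 0 := by
        rw [List.length_drop, getD_drop _ _ _ _ (by omega)]
        have : j + 1 + (l.length - (j + 1) - 1) = l.length - 1 := by omega
        rw [this]; exact hlast
      rw [countP_dropLast _ ht, hlastt]
      simp only [List.length_dropLast, List.length_drop]
      norm_num
      push_cast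
      omega
  | case3 l c hlen hlast hbrk =>
      intro hj hnz
      have hb1 := hbrk.1
      simp only [List.length_append, List.length_dropLast, List.length_singleton] at hb1
      rw [binLoop, if_pos hlen, if_neg hlast, if_pos hbrk]
      rw [List.drop_eq_nil_of_le (by omega)]
      simp
  | case4 l c hlen hlast hbrk ih =>
      intro hj hnz
      have hsnd : (l.dropLast ++ [0]).getLastD 1 = 0 := by simp [List.getLastD_concat]
      have hjne : (j : Int) ≠ ((l.dropLast ++ [0]).length : Int) - 1 := fun h => hbrk ⟨h, hsnd⟩
      rw [List.length_append, List.length_dropLast] at hjne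
      have hjlt : j < l.length - 1 := by
        simp only [List.length_singleton] at hjne
        push_cast at hjne
        omega
      have hj1 : j < (l.dropLast ++ [0]).length := by
        rw [List.length_append, List.length_dropLast]; simp; omega
      have hnz1 : (l.dropLast ++ [0]).getD j 0 ≠ 0 := by
        rw [getD_append_left _ _ _ _ (by rw [List.length_dropLast]; omega),
          getD_dropLast _ _ _ hjlt]
        exact hnz
      rw [binLoop, if_pos hlen, if_neg hlast, if_neg hbrk, ih hj1 hnz1,
        List.drop_append_of_le_length (by rw [List.length_dropLast]; omega), drop_dropLast']
      rw [getLastD_getD _ _ hlen] at hlast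
      have ht : 0 < (l.drop (j + 1)).length := by rw [List.length_drop]; omega
      have hlastt : (l.drop (j + 1)).getD ((l.drop (j + 1)).length - 1) 0 ≠ 0 := by
        rw [List.length_drop, getD_drop _ _ _ _ (by omega)]
        have : j + 1 + (l.length - (j + 1) - 1) = l.length - 1 := by omega
        rw [this]; exact hlast
      rw [countP_dropLast _ ht, if_pos hlastt]
      simp only [List.length_append, List.length_dropLast, List.length_drop, List.countP_append,
        List.countP_singleton]
      norm_num
      push_cast
      omega
  | case5 l c hlen =>
      intro hj hnz
      omega

-- guard false ⇒ the found index is in range and its element is nonzero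
theorem idx_in_range (l : List Int) (hne : l ≠ [])
    (hg : ¬((List.findIdx? (· = 1) l).getD 0 = 0 ∧ l.headD 1 = 0)) :
    (List.findIdx? (· = 1) l).getD 0 < l.length ∧ l.getD ((List.findIdx? (· = 1) l).getD 0) 0 ≠ 0 := by
  cases h : List.findIdx? (fun x => decide (x = 1)) l with
  | none =>
      simp only [h, Option.getD_none] at hg ⊢
      cases l with
      | nil => exact absurd rfl hne
      | cons x xs =>
          refine ⟨by simp, ?_⟩
          simp only [List.getD_cons_zero]
          intro hx
          exact hg (by simp [hx])
  | some k =>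
      rw [List.findIdx?_eq_some_iff_getElem] at h
      obtain ⟨hk, hp, -⟩ := h
      simp only [Option.getD_some]
      refine ⟨hk, ?_⟩
      simp only [decide_eq_true_eq] at hp
      rw [List.getD_eq_getElem _ _ hk, hp]
      norm_num

-- ===== VERDICT (by name: the statement is the Claim_ definition above) =====
theorem binary_count_spec : Claim_equal_binary_count := by
  intro l _ hpre
  unfold Pre_binary_count at hpre
  unfold Spec_binary_count binary_count binary_count_alt
  have hj0 : getOneIndexGo l 0 = (List.findIdx? (· = 1) l).getD 0 := by
    rw [getOneIndexGo_eq]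
    cases List.findIdx? (· = 1) l <;> simp
  simp only [hj0]
  by_cases hg : (List.findIdx? (· = 1) l).getD 0 = 0 ∧ l.headD 1 = 0
  · simp only [if_pos hg]
  · rw [if_neg hg, if_neg hg]
    obtain ⟨h1, h2⟩ := idx_in_range l hpre hg
    rw [binLoop_eq _ _ _ h1 h2]
    omega
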